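-- pv_equiv track=rewrite | github.com/sach1nkhatri/DSA-Assignmenrt-Codes | Hiking Trail.py | longest_hike
-- ===== SOURCE A (Python) =====
-- def longest_hike(nums, k):
--     n = len(nums)
--     start = 0
--     max_length = 0
--
--     for end in range(1, n):
--         if nums[end] > nums[end - 1]:
--             gain = nums[end] - nums[end - 1]
--             if gain > k:
--                 start = end
--         else:
--             start = end
--
--         max_length = max(max_length, end - start + 1)
--
--     return max_length
-- ===== SOURCE B (Python) =====
-- def longest_hike(nums, k):
--     n = len(nums)
--     if n < 2:
--         return 0
--     cuts = [0] + [i for i in range(1, n) if not (0 < nums[i] - nums[i - 1] <= k)] + [n]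
--     return max(b - a for a, b in zip(cuts, cuts[1:]))
-- ===== Notes on version B (the rewrite author's own statement) =====
-- stated objective: alternative
-- what changed: B segments the trail in two stages: it first collects the breakpoint indices where the step is invalid (non-increasing or gain > k), then returns the maximum gap between consecutive cut positions [0]+breakpoints+[n], instead of A's single scan maintaining a sliding window start and running maximum.
import Mathlib
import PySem

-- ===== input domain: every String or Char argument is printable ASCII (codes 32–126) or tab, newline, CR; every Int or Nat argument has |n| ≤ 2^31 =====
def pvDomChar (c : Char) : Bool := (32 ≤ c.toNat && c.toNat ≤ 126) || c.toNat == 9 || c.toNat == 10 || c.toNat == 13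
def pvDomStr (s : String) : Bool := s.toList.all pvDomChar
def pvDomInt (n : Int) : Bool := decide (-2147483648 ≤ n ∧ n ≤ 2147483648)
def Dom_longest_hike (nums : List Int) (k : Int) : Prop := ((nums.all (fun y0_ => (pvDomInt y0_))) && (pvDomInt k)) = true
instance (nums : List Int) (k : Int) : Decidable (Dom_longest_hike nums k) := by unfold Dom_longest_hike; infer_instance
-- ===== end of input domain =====

-- B replaces A's sliding-window scan by a two-stage segmentation: collect the
-- breakpoint indices, then take the maximum gap between consecutive cuts
-- (objective: alternative; same O(n) cost).

-- ===== PORT A =====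
def longest_hike (nums : List Int) (k : Int) : Int :=
  let n := PySem.List.len nums
  let r := (PySem.List.pyRange 1 n 1).foldl (fun (st : Int × Int) (e : Int) =>
    let start :=
      if PySem.List.pyGetD nums e 0 > PySem.List.pyGetD nums (e - 1) 0 then
        let gain := PySem.List.pyGetD nums e 0 - PySem.List.pyGetD nums (e - 1) 0
        if gain > k then e else st.1
      else e
    (start, max st.2 (e - start + 1))) ((0 : Int), (0 : Int))
  r.2

-- ===== PORT B =====
-- the comprehension's filter: index i starts a new segment (invalid step into i)
def pvBad (nums : List Int) (k : Int) (i : Int) : Bool :=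
  !(decide (0 < PySem.List.pyGetD nums i 0 - PySem.List.pyGetD nums (i - 1) 0 ∧
            PySem.List.pyGetD nums i 0 - PySem.List.pyGetD nums (i - 1) 0 ≤ k))

def longest_hike_alt (nums : List Int) (k : Int) : Int :=
  let n := PySem.List.len nums
  if n < 2 then 0
  else
    let cuts := 0 :: ((PySem.List.pyRange 1 n 1).filter (pvBad nums k) ++ [n])
    let diffs := (cuts.zip cuts.tail).map (fun p => p.2 - p.1)
    -- Python's max(...) on this generator; exact since diffs is provably nonempty here
    (PySem.List.max? diffs (fun y => y)).getD 0

-- ===== PRECONDITION & SPEC =====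
def Spec_longest_hike (nums : List Int) (k : Int) (out : Int) : Prop := out = longest_hike_alt nums k
instance (nums : List Int) (k : Int) (out : Int) : Decidable (Spec_longest_hike nums k out) := by unfold Spec_longest_hike; infer_instance

-- ===== CLAIM =====
def Claim_equal_longest_hike : Prop := ∀ (nums : List Int) (k : Int), Dom_longest_hike nums k → Spec_longest_hike nums k (longest_hike nums k)

-- ===== LEMMAS AND PROOFS =====

-- proof-only name for A's loop body and its equation
def hikeStepA (nums : List Int) (k : Int) (st : Int × Int) (e : Int) : Int × Int :=
  let start :=
    if PySem.List.pyGetD nums e 0 > PySem.List.pyGetD nums (e - 1) 0 then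
      if PySem.List.pyGetD nums e 0 - PySem.List.pyGetD nums (e - 1) 0 > k then e else st.1
    else e
  (start, max st.2 (e - start + 1))

lemma hike_portA (nums : List Int) (k : Int) :
    longest_hike nums k =
      ((PySem.List.pyRange 1 (PySem.List.len nums) 1).foldl (hikeStepA nums k) (0, 0)).2 := rfl

-- the last cut so far (last element of a :: l)
def lastOf (a : Int) (l : List Int) : Int :=
  match l with
  | [] => a
  | b :: t => lastOf b t

-- max gap between consecutive elements of a :: l ++ [e]
def gapMax (a : Int) (l : List Int) (e : Int) : Int :=
  match l with
  | [] => e - a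
  | b :: t => max (b - a) (gapMax b t e)

lemma hikeStepA_eq (nums : List Int) (k : Int) (st : Int × Int) (e : Int) :
    hikeStepA nums k st e =
      (if pvBad nums k e then e else st.1,
       max st.2 (e - (if pvBad nums k e then e else st.1) + 1)) := by
  unfold hikeStepA pvBad
  by_cases h1 : PySem.List.pyGetD nums e 0 > PySem.List.pyGetD nums (e - 1) 0
  · by_cases h2 : PySem.List.pyGetD nums e 0 - PySem.List.pyGetD nums (e - 1) 0 > k
    · simp only [if_pos h1, if_pos h2]
      have : pvBad nums k e = true := by unfold pvBad; simp; omega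
      unfold pvBad at this; rw [this]; simp
    · simp only [if_pos h1, if_neg h2]
      have : pvBad nums k e = false := by unfold pvBad; simp; omega
      unfold pvBad at this; rw [this]; simp
  · simp only [if_neg h1]
    have : pvBad nums k e = true := by unfold pvBad; simp; omega
    unfold pvBad at this; rw [this]; simp

lemma lastOf_append (a : Int) (l : List Int) (b : Int) :
    lastOf a (l ++ [b]) = b := by
  induction l generalizing a with
  | nil => rfl
  | cons c t ih => simpa [lastOf] using ih c

lemma gapMax_mono (a e e' : Int) (l : List Int) (h : e ≤ e') :
    gapMax a l e' = max (gapMax a l e) (e' - lastOf a l) := by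
  induction l generalizing a with
  | nil => simp [gapMax, lastOf]; omega
  | cons b t ih =>
      simp only [gapMax, lastOf, ih b]
      rw [max_assoc]

lemma gapMax_append (a b e : Int) (l : List Int) :
    gapMax a (l ++ [b]) e = max (gapMax a l b) (e - b) := by
  induction l generalizing a with
  | nil => rfl
  | cons c t ih => simp only [gapMax, List.cons_append, ih c, max_assoc]

-- the adjacent-difference list of a :: l ++ [e]
def diffList (a : Int) (l : List Int) (e : Int) : List Int :=
  match l with
  | [] => [e - a]
  | b :: t => (b - a) :: diffList b t e

lemma zip_map_diff (a e : Int) (l : List Int) :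
    (((a :: (l ++ [e])).zip (l ++ [e])).map (fun p : Int × Int => p.2 - p.1))
      = diffList a l e := by
  induction l generalizing a with
  | nil => rfl
  | cons b t ih => simpa [List.zip, diffList] using ih b

lemma foldl_max_diffList (x a e : Int) (l : List Int) :
    (diffList a l e).foldl max x = max x (gapMax a l e) := by
  induction l generalizing a x with
  | nil => rfl
  | cons b t ih =>
      simp only [diffList, List.foldl_cons, gapMax]
      rw [ih (max x (b - a)) b, max_assoc]

lemma max?_diffList (a e : Int) (l : List Int) :
    PySem.List.max? (diffList a l e) (fun y => y) = some (gapMax a l e) := by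
  cases l with
  | nil => rfl
  | cons b t =>
      rw [diffList, PySem.List.max?_id_cons, foldl_max_diffList]
      rfl

-- loop invariant: after processing end = 1..j, A's start is the last cut and
-- A's max_length is the max gap of (0 :: cuts-so-far ++ [j+1])
lemma hike_inv (nums : List Int) (k : Int) (j : Nat) (hj : 1 ≤ j) :
    ((PySem.List.pyRange 1 (1 + (j : Int)) 1).foldl (hikeStepA nums k) (0, 0)).1
        = lastOf 0 ((PySem.List.pyRange 1 (1 + (j : Int)) 1).filter (pvBad nums k))
    ∧ ((PySem.List.pyRange 1 (1 + (j : Int)) 1).foldl (hikeStepA nums k) (0, 0)).2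
        = gapMax 0 ((PySem.List.pyRange 1 (1 + (j : Int)) 1).filter (pvBad nums k))
            (1 + (j : Int)) := by
  induction j with
  | zero => omega
  | succ j ih =>
      by_cases hj1 : 1 ≤ j
      · obtain ⟨ih1, ih2⟩ := ih hj1
        have hc : (1 : Int) + ((j + 1 : Nat) : Int) = (1 + (j : Int)) + 1 := by push_cast; ring
        rw [hc, PySem.List.pyRange_one_succ_right (by omega : (1 : Int) ≤ 1 + (j : Int))]
        set e : Int := 1 + (j : Int) with he
        set L := PySem.List.pyRange 1 e 1
        simp only [List.foldl_append, List.foldl_cons, List.foldl_nil, List.filter_append,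
          List.filter_cons, List.filter_nil]
        rw [hikeStepA_eq]
        by_cases hb : pvBad nums k e
        · simp only [hb, if_true]
          constructor
          · exact (lastOf_append 0 _ e).symm
          · rw [ih2, gapMax_append]
            omega
        · simp only [hb, if_false, Bool.false_eq_true, List.append_nil]
          refine ⟨ih1, ?_⟩
          rw [ih2, ih1, gapMax_mono 0 e (e + 1) _ (by omega)]
          omega
      · have hj0 : j = 0 := by omega
        subst hj0
        have h1 : (1 : Int) + ((1 : Nat) : Int) = 2 := by norm_num
        rw [h1]
        have hr : PySem.List.pyRange 1 2 1 = [1] := by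
          simpa using PySem.List.pyRange_one_singleton (a := 1)
        rw [hr]
        simp only [List.foldl_cons, List.foldl_nil, List.filter_cons, List.filter_nil]
        rw [hikeStepA_eq]
        by_cases hb : pvBad nums k (1 : Int)
        · simp [hb, lastOf, gapMax]
        · simp [hb, lastOf, gapMax]

-- ===== VERDICT =====
theorem longest_hike_spec : Claim_equal_longest_hike := by
  intro nums k _
  unfold Spec_longest_hike
  rw [hike_portA]
  unfold longest_hike_alt
  by_cases hn : nums.length < 2
  · have hnil : PySem.List.pyRange 1 ((nums.length : Nat) : Int) 1 = [] :=
      PySem.List.pyRange_one_eq_nil (by omega)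
    simp only [PySem.List.len_eq]
    rw [hnil]
    simp [(by omega : ((nums.length : Nat) : Int) < 2)]
  · have hn2 : 2 ≤ nums.length := by omega
    have hlen : ((nums.length : Nat) : Int) = 1 + ((nums.length - 1 : Nat) : Int) := by
      omega
    simp only [PySem.List.len_eq]
    rw [if_neg (by omega : ¬ ((nums.length : Nat) : Int) < 2)]
    obtain ⟨h1, h2⟩ := hike_inv nums k (nums.length - 1) (by omega)
    simp only [List.tail_cons]
    rw [zip_map_diff, max?_diffList, Option.getD_some, hlen, h2]
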